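-- pv_equiv track=rewrite | github.com/leif/lol | wordplay.py | ptiler
-- ===== SOURCE A (Python) =====
-- rev = lambda s: s[::-1]
--
-- def ptiler( seq ):
--     NW = list(seq)
--     NE = [rev(r) for r in NW]
--     SW = rev(NW)
--     SE = [rev(r) for r in SW]
--     seq = [NW, NE, SW, SE]
--     n = len(seq)
--     m = len(seq[0])
--     return (' '.join(seq[i+(j*(n//2))][iy] for i in range(n//2)) for j in range(n//2) for iy in range(m))
-- ===== SOURCE B (Python) =====
-- def ptiler(seq):
--     rows = list(seq)
--     for r in rows:
--         yield r + ' ' + r[::-1]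
--     for r in reversed(rows):
--         yield r + ' ' + r[::-1]
-- ===== Notes on version B (the rewrite author's own statement) =====
-- stated objective: simpler
-- what changed: B drops A's four materialized quadrant lists (NE/SW/SE) and the seq[i+j*(n//2)][iy] generator index arithmetic, emitting each output row directly as r + ' ' + r[::-1] in one forward pass and one reversed pass.
import Mathlib
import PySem

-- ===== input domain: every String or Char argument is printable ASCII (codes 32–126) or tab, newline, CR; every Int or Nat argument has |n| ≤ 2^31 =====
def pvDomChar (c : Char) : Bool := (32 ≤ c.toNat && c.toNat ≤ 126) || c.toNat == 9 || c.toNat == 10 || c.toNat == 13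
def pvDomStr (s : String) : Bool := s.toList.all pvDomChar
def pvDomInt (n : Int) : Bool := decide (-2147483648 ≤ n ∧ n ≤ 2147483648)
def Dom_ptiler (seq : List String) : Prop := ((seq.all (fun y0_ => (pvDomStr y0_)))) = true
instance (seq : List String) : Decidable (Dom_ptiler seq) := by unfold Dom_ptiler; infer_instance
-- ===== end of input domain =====

-- B drops A's four materialized quadrant lists and index arithmetic for two direct passes (objective: simpler).

-- ===== PORT A =====
-- rev = lambda s: s[::-1]  (never raises, so the total getD form is exact)
def pvRev (s : String) : String := (PySem.Str.slice? s none none (-1)).getD ""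

def ptiler (seq : List String) : List String :=
  let NW := seq
  let NE := NW.map pvRev
  let SW := NW.reverse
  let SE := SW.map pvRev
  let quad := [NW, NE, SW, SE]
  let n : Int := quad.length
  let m : Int := (PySem.List.pyGetD quad 0 []).length
  (PySem.List.pyRange 0 (PySem.Int.floordiv n 2) 1).flatMap (fun j =>
    (PySem.List.pyRange 0 m 1).map (fun iy =>
      PySem.Str.join " " ((PySem.List.pyRange 0 (PySem.Int.floordiv n 2) 1).map (fun i =>
        PySem.List.pyGetD (PySem.List.pyGetD quad (i + j * PySem.Int.floordiv n 2) []) iy ""))))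

-- ===== PORT B =====
-- r + ' ' + r[::-1]  (string concatenation ported on code points, exact)
def pvMirrorRow (r : String) : String := String.ofList (r.toList ++ ' ' :: r.toList.reverse)

def ptiler_alt (seq : List String) : List String :=
  let rows := seq
  rows.map pvMirrorRow ++ rows.reverse.map pvMirrorRow

-- ===== PRECONDITION & SPEC =====
def Spec_ptiler (seq : List String) (out : List String) : Prop := out = ptiler_alt seq
instance (seq : List String) (out : List String) : Decidable (Spec_ptiler seq out) := by unfold Spec_ptiler; infer_instance

-- ===== CLAIM (what is proved, stated in full; the proofs are below) =====
def Claim_equal_ptiler : Prop := ∀ (seq : List String), Dom_ptiler seq → Spec_ptiler seq (ptiler seq)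

-- ===== LEMMAS AND PROOFS =====

theorem pvRev_empty : pvRev "" = "" := by decide

theorem pvRev_eq (s : String) : pvRev s = String.ofList s.toList.reverse := by
  simp [pvRev, PySem.Str.slice?_none_none_neg_one]

theorem join_pair (a b : String) :
    PySem.Str.join " " [a, b] = String.ofList (a.toList ++ ' ' :: b.toList) := by
  apply String.toList_injective
  simp [PySem.Str.toList_join, PySem.Chars.join_cons_cons, PySem.Chars.join_singleton]

-- one half-block of A's generator equals one straight pass of B over the same rows
theorem block_eq (l : List String) :
    (PySem.List.pyRange 0 (l.length : Int) 1).map (fun iy =>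
        PySem.Str.join " " [PySem.List.pyGetD l iy "", PySem.List.pyGetD (l.map pvRev) iy ""])
      = l.map pvMirrorRow := by
  have h : ∀ iy : Int,
      PySem.Str.join " " [PySem.List.pyGetD l iy "", PySem.List.pyGetD (l.map pvRev) iy ""]
        = pvMirrorRow (PySem.List.pyGetD l iy "") := by
    intro iy
    have hm := PySem.List.pyGetD_map pvRev l iy ""
    rw [pvRev_empty] at hm
    rw [hm, join_pair, pvRev_eq, pvMirrorRow]
    simp
  calc (PySem.List.pyRange 0 (l.length : Int) 1).map (fun iy =>
          PySem.Str.join " " [PySem.List.pyGetD l iy "", PySem.List.pyGetD (l.map pvRev) iy ""])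
      = (PySem.List.pyRange 0 (l.length : Int) 1).map
          (fun iy => pvMirrorRow (PySem.List.pyGetD l iy "")) := by
        exact List.map_congr_left (fun iy _ => h iy)
    _ = ((PySem.List.pyRange 0 (l.length : Int) 1).map
          (fun iy => PySem.List.pyGetD l iy "")).map pvMirrorRow := by
        rw [List.map_map]; rfl
    _ = l.map pvMirrorRow := by
        rw [show ((l.length : Int)) = PySem.List.len l from (PySem.List.len_eq l).symm,
          PySem.List.map_pyGetD_pyRange_zero]

-- ===== VERDICT (by name: the statement is the Claim_ definition above) =====
theorem ptiler_spec : Claim_equal_ptiler := by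
  intro seq _
  show ptiler seq = ptiler_alt seq
  unfold ptiler ptiler_alt
  simp only [List.length_cons, List.length_nil]
  rw [show PySem.Int.floordiv ((((0+1+1+1+1 : Nat)) : Int)) 2 = 2 from by decide]
  rw [show PySem.List.pyRange 0 2 1 = [0, 1] from by decide]
  simp only [List.flatMap_cons, List.flatMap_nil, List.append_nil, List.map_cons, List.map_nil]
  simp only [show ∀ a b c d : List String, PySem.List.pyGetD [a,b,c,d] ((0:Int)+0*2) [] = a from fun _ _ _ _ => rfl,
    show ∀ a b c d : List String, PySem.List.pyGetD [a,b,c,d] ((1:Int)+0*2) [] = b from fun _ _ _ _ => rfl,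
    show ∀ a b c d : List String, PySem.List.pyGetD [a,b,c,d] ((0:Int)+1*2) [] = c from fun _ _ _ _ => rfl,
    show ∀ a b c d : List String, PySem.List.pyGetD [a,b,c,d] ((1:Int)+1*2) [] = d from fun _ _ _ _ => rfl,
    show ∀ a b c d : List String, PySem.List.pyGetD [a,b,c,d] (0:Int) [] = a from fun _ _ _ _ => rfl]
  have h2 := block_eq seq.reverse
  rw [List.length_reverse] at h2
  rw [block_eq seq, h2]
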